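-- pv_equiv track=rewrite | github.com/yurividal/WaveScope | main.py | _build_unique_oui_suffix_vendor_index
-- ===== SOURCE A (Python) =====
-- from typing import Optional, List, Dict, Tuple
--
-- def _build_unique_oui_suffix_vendor_index(oui_db: Dict[str, str]) -> Dict[str, str]:
--     """Build a conservative BB:CC -> vendor map from globally-administered OUIs.
--
--     We only keep suffixes that map to exactly one globally-administered OUI
--     prefix, to avoid broad false positives.
--     """
--     buckets: Dict[str, List[str]] = {}
--     for prefix, vendor in (oui_db or {}).items():
--         if not prefix or len(prefix) < 8 or not vendor:
--             continue
--         try: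
--             first_octet = int(prefix[:2], 16)
--         except Exception:
--             continue
--         if first_octet & 0x02:
--             continue
--         suffix = prefix[3:8]
--         buckets.setdefault(suffix, []).append(prefix)
--
--     resolved: Dict[str, str] = {}
--     for suffix, prefixes in buckets.items():
--         if len(prefixes) != 1:
--             continue
--         only_prefix = prefixes[0]
--         vendor = (oui_db or {}).get(only_prefix, "")
--         if vendor:
--             resolved[suffix] = vendor
--     return resolved
-- ===== SOURCE B (Python) =====
-- def _build_unique_oui_suffix_vendor_index(oui_db):
--     """Single pass: keep sole candidates in a dict, demote repeated suffixes."""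
--     candidates = {}
--     ambiguous = set()
--     for prefix, vendor in (oui_db or {}).items():
--         if not prefix or len(prefix) < 8 or not vendor:
--             continue
--         try:
--             first_octet = int(prefix[:2], 16)
--         except Exception:
--             continue
--         if first_octet & 0x02:
--             continue
--         suffix = prefix[3:8]
--         if suffix in ambiguous:
--             continue
--         if suffix in candidates:
--             del candidates[suffix]
--             ambiguous.add(suffix)
--         else:
--             candidates[suffix] = vendor
--     return candidates
-- ===== Notes on version B (the rewrite author's own statement) =====
-- stated objective: simpler
-- what changed: Replaces the two-pass bucket-grouping (suffix -> list of prefixes, then a second filtering pass that re-looks the vendor up in the dict) by a single pass that keeps a dict of sole candidates suffix -> vendor plus a set of suffixes already seen twice, demoting a candidate when its suffix repeats.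
import Mathlib
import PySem

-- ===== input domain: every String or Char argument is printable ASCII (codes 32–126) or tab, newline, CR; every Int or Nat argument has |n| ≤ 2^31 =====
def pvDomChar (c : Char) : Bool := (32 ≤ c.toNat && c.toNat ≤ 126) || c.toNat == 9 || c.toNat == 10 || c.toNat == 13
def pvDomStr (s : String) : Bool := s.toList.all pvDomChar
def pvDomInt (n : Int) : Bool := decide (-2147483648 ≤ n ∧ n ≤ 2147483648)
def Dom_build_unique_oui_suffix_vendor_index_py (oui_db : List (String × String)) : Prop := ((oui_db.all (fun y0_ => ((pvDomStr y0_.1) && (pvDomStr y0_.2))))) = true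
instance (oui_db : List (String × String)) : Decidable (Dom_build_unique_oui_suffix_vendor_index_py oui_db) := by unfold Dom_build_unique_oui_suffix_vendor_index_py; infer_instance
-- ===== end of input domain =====

-- B replaces A's two passes (group prefixes into buckets by suffix, then filter buckets of size one,
-- re-looking the vendor up in the dict) by a single pass keeping sole candidates suffix -> vendor plus
-- a set of demoted (repeated) suffixes; objective: simpler. Return values are proved equal on all inputs.

-- ===== PORT A =====
-- The Python parameter is a dict; the association list is normalised to the dict it denotes
-- (last value wins, first position kept) before iterating its items, exactly as Python's dict holds it.
def build_unique_oui_suffix_vendor_index_py (oui_db : List (String × String)) : List (String × String) :=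
  let d : PySem.Dict String String := PySem.Dict.ofList oui_db
  let buckets : PySem.Dict String (List String) :=
    d.items.foldl (fun b pv =>
      if pv.1 = "" ∨ PySem.Str.len pv.1 < 8 ∨ pv.2 = "" then b
      else
        match PySem.Int.ofCharsBase? (PySem.List.slice pv.1.toList none (some 2)) 16 with
        | none => b            -- int(prefix[:2], 16) raised: continue
        | some fo =>
          if PySem.Int.band fo 2 ≠ 0 then b
          else b.modify (String.mk (PySem.List.slice pv.1.toList (some 3) (some 8))) [] (fun t => t ++ [pv.1]))
      PySem.Dict.empty
  let resolved : PySem.Dict String String :=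
    buckets.items.foldl (fun r sp =>
      if sp.2.length ≠ 1 then r
      else
        -- prefixes[0]: in this branch sp.2.length = 1, so pyGetD's default is never used
        if (PySem.Dict.getD d (PySem.List.pyGetD sp.2 0 "") "") = "" then r
        else r.insert sp.1 (PySem.Dict.getD d (PySem.List.pyGetD sp.2 0 "") ""))
      PySem.Dict.empty
  resolved.items

-- ===== PORT B =====
def build_unique_oui_suffix_vendor_index_py_alt (oui_db : List (String × String)) : List (String × String) :=
  let d : PySem.Dict String String := PySem.Dict.ofList oui_db
  let st :=
    d.items.foldl (fun (st : PySem.Dict String String × PySem.Set String) pv =>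
      if pv.1 = "" ∨ PySem.Str.len pv.1 < 8 ∨ pv.2 = "" then st
      else
        match PySem.Int.ofCharsBase? (PySem.List.slice pv.1.toList none (some 2)) 16 with
        | none => st           -- int(prefix[:2], 16) raised: continue
        | some fo =>
          if PySem.Int.band fo 2 ≠ 0 then st
          else
            if PySem.Set.contains st.2 (String.mk (PySem.List.slice pv.1.toList (some 3) (some 8))) then st
            else if st.1.contains (String.mk (PySem.List.slice pv.1.toList (some 3) (some 8))) then
              (st.1.erase (String.mk (PySem.List.slice pv.1.toList (some 3) (some 8))),
               PySem.Set.add st.2 (String.mk (PySem.List.slice pv.1.toList (some 3) (some 8))))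
            else (st.1.insert (String.mk (PySem.List.slice pv.1.toList (some 3) (some 8))) pv.2, st.2))
      (PySem.Dict.empty, PySem.Set.empty)
  st.1.items

-- ===== PRECONDITION & SPEC =====
def Spec_build_unique_oui_suffix_vendor_index_py (oui_db : List (String × String)) (out : List (String × String)) : Prop := out = build_unique_oui_suffix_vendor_index_py_alt oui_db
instance (oui_db : List (String × String)) (out : List (String × String)) : Decidable (Spec_build_unique_oui_suffix_vendor_index_py oui_db out) := by unfold Spec_build_unique_oui_suffix_vendor_index_py; infer_instance

-- ===== CLAIM (what is proved, stated in full; the proofs are below) =====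
def Claim_equal_build_unique_oui_suffix_vendor_index_py : Prop := ∀ (oui_db : List (String × String)), Dom_build_unique_oui_suffix_vendor_index_py oui_db → Spec_build_unique_oui_suffix_vendor_index_py oui_db (build_unique_oui_suffix_vendor_index_py oui_db)

-- ===== LEMMAS AND PROOFS =====

-- The shared entry guard: `some (suffix, prefix, vendor)` iff the item passes all of A's/B's guards.
def pvPass (pv : String × String) : Option (String × String × String) :=
  if pv.1 = "" ∨ PySem.Str.len pv.1 < 8 ∨ pv.2 = "" then none
  else
    match PySem.Int.ofCharsBase? (PySem.List.slice pv.1.toList none (some 2)) 16 with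
    | none => none
    | some fo =>
      if PySem.Int.band fo 2 ≠ 0 then none
      else some (String.mk (PySem.List.slice pv.1.toList (some 3) (some 8)), pv.1, pv.2)

-- B's loop body on an entry that passed the guards
def pvGB (st : PySem.Dict String String × PySem.Set String) (e : String × String × String) :
    PySem.Dict String String × PySem.Set String :=
  if PySem.Set.contains st.2 e.1 then st
  else if st.1.contains e.1 then (st.1.erase e.1, PySem.Set.add st.2 e.1)
  else (st.1.insert e.1 e.2.2, st.2)

theorem pvGB_amb (st : PySem.Dict String String × PySem.Set String) (e : String × String × String)
    (h : PySem.Set.contains st.2 e.1 = true) : pvGB st e = st := by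
  unfold pvGB; rw [if_pos h]

theorem pvGB_demote (st : PySem.Dict String String × PySem.Set String) (e : String × String × String)
    (h1 : PySem.Set.contains st.2 e.1 = false) (h2 : st.1.contains e.1 = true) :
    pvGB st e = (st.1.erase e.1, PySem.Set.add st.2 e.1) := by
  have h1' : ¬ (PySem.Set.contains st.2 e.1 = true) := by rw [h1]; simp
  unfold pvGB; rw [if_neg h1', if_pos h2]

theorem pvGB_new (st : PySem.Dict String String × PySem.Set String) (e : String × String × String)
    (h1 : PySem.Set.contains st.2 e.1 = false) (h2 : st.1.contains e.1 = false) :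
    pvGB st e = (st.1.insert e.1 e.2.2, st.2) := by
  have h1' : ¬ (PySem.Set.contains st.2 e.1 = true) := by rw [h1]; simp
  have h2' : ¬ (st.1.contains e.1 = true) := by rw [h2]; simp
  unfold pvGB; rw [if_neg h1', if_neg h2']

theorem pvPass_some {pv : String × String} {e : String × String × String}
    (h : pvPass pv = some e) : e.2.1 = pv.1 ∧ e.2.2 = pv.2 ∧ pv.2 ≠ "" := by
  unfold pvPass at h
  split_ifs at h with h1
  split at h
  · exact absurd h (by simp)
  · split_ifs at h
    have he := (Option.some_inj.mp h).symm
    subst he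
    refine ⟨rfl, rfl, ?_⟩
    push_neg at h1
    exact h1.2.2

theorem pv_foldA_eq (l : List (String × String)) (init : PySem.Dict String (List String)) :
    l.foldl (fun b pv =>
      if pv.1 = "" ∨ PySem.Str.len pv.1 < 8 ∨ pv.2 = "" then b
      else
        match PySem.Int.ofCharsBase? (PySem.List.slice pv.1.toList none (some 2)) 16 with
        | none => b
        | some fo =>
          if PySem.Int.band fo 2 ≠ 0 then b
          else b.modify (String.mk (PySem.List.slice pv.1.toList (some 3) (some 8))) [] (fun t => t ++ [pv.1])) init
    = (l.filterMap pvPass).foldl (fun b e => b.modify e.1 [] (fun t => t ++ [e.2.1])) init := by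
  rw [List.foldl_filterMap]
  refine PySem.List.foldl_congr_mem l _ _ init ?_
  intro acc x _
  unfold pvPass
  by_cases h1 : x.1 = "" ∨ PySem.Str.len x.1 < 8 ∨ x.2 = ""
  · simp only [if_pos h1]
  · simp only [if_neg h1]
    cases hfo : PySem.Int.ofCharsBase? (PySem.List.slice x.1.toList none (some 2)) 16 with
    | none => rfl
    | some fo =>
      dsimp only
      split_ifs <;> rfl

theorem pv_foldB_eq (l : List (String × String)) (init : PySem.Dict String String × PySem.Set String) :
    l.foldl (fun (st : PySem.Dict String String × PySem.Set String) pv =>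
      if pv.1 = "" ∨ PySem.Str.len pv.1 < 8 ∨ pv.2 = "" then st
      else
        match PySem.Int.ofCharsBase? (PySem.List.slice pv.1.toList none (some 2)) 16 with
        | none => st
        | some fo =>
          if PySem.Int.band fo 2 ≠ 0 then st
          else
            if PySem.Set.contains st.2 (String.mk (PySem.List.slice pv.1.toList (some 3) (some 8))) then st
            else if st.1.contains (String.mk (PySem.List.slice pv.1.toList (some 3) (some 8))) then
              (st.1.erase (String.mk (PySem.List.slice pv.1.toList (some 3) (some 8))),
               PySem.Set.add st.2 (String.mk (PySem.List.slice pv.1.toList (some 3) (some 8))))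
            else (st.1.insert (String.mk (PySem.List.slice pv.1.toList (some 3) (some 8))) pv.2, st.2)) init
    = (l.filterMap pvPass).foldl pvGB init := by
  rw [List.foldl_filterMap]
  refine PySem.List.foldl_congr_mem l _ _ init ?_
  intro acc x _
  unfold pvPass pvGB
  by_cases h1 : x.1 = "" ∨ PySem.Str.len x.1 < 8 ∨ x.2 = ""
  · simp only [if_pos h1]
  · simp only [if_neg h1]
    cases hfo : PySem.Int.ofCharsBase? (PySem.List.slice x.1.toList none (some 2)) 16 with
    | none => rfl
    | some fo =>
      dsimp only
      by_cases h2 : PySem.Int.band fo 2 ≠ 0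
      · rw [if_pos h2, if_pos h2]
      · rw [if_neg h2, if_neg h2]

-- (m == 1) only depends on whether m = 1
theorem pv_beq_one_congr (m n : Nat) (h : m = 1 ↔ n = 1) : (m == 1) = (n == 1) := by
  by_cases hm : m = 1
  · rw [hm, h.mp hm]
  · have hn : ¬ n = 1 := fun hh => hm (h.mpr hh)
    rw [beq_eq_false_iff_ne.mpr hm, beq_eq_false_iff_ne.mpr hn]

-- a suffix whose key count is one determines a unique passing entry
theorem pv_filter_key_singleton (l : List (String × String × String)) (c : String)
    (h : ((l.map (fun e => e.1)).count c) = 1) :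
    ∃ x, l.filter (fun e => e.1 == c) = [x] ∧ x ∈ l ∧ x.1 = c := by
  have hlen : (l.filter (fun e => e.1 == c)).length = 1 := by
    rw [← List.countP_eq_length_filter]
    rw [List.count_eq_countP, List.countP_map] at h
    exact h
  obtain ⟨x, hx⟩ := List.length_eq_one_iff.mp hlen
  have hxmem : x ∈ l.filter (fun e => e.1 == c) := by rw [hx]; exact List.mem_singleton.mpr rfl
  have := List.mem_filter.mp hxmem
  exact ⟨x, hx, this.1, by simpa using this.2⟩

-- deduplication does not disturb a filter that keeps only elements occurring once
theorem pv_ofList_filter_unique {α : Type} [BEq α] [LawfulBEq α] (xs : List α) (p : α → Bool)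
    (h : ∀ s, p s = true → xs.count s ≤ 1) :
    (PySem.Set.ofList xs).filter p = xs.filter p := by
  induction xs using List.reverseRecOn with
  | nil => rfl
  | append_singleton xs x ih =>
    have hadd : PySem.Set.ofList (xs ++ [x]) = PySem.Set.add (PySem.Set.ofList xs) x := by
      rw [PySem.Set.ofList_eq_foldl, PySem.Set.ofList_eq_foldl, List.foldl_append]
      rfl
    have hmono : ∀ s, p s = true → xs.count s ≤ 1 := by
      intro s hs
      have := h s hs
      rw [List.count_append] at this
      omega
    by_cases hx : x ∈ xs
    · have ha2 : PySem.Set.add (PySem.Set.ofList xs) x = PySem.Set.ofList xs := by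
        simp [PySem.Set.add, PySem.Set.contains, List.contains_eq_mem, PySem.Set.mem_ofList, hx]
      have hpx : p x = false := by
        by_contra hpx'
        have hle := h x (by simpa using hpx')
        have hpos : 0 < xs.count x := List.count_pos_iff.mpr hx
        rw [List.count_append, List.count_singleton] at hle
        simp at hle
        omega
      rw [hadd, ha2, List.filter_append, ih hmono]
      simp [hpx]
    · have ha2 : PySem.Set.add (PySem.Set.ofList xs) x = PySem.Set.ofList xs ++ [x] := by
        simp [PySem.Set.add, PySem.Set.contains, List.contains_eq_mem, PySem.Set.mem_ofList, hx]
      rw [hadd, ha2, List.filter_append, List.filter_append, ih hmono]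

-- characterisation of A's bucket dict
theorem pv_buckets_items (es : List (String × String × String)) :
    (es.foldl (fun b e => b.modify e.1 [] (fun t => t ++ [e.2.1])) PySem.Dict.empty).items
    = (PySem.Set.ofList (es.map (fun e => e.1))).map
        (fun s => (s, (es.filter (fun e => e.1 == s)).map (fun e => e.2.1))) := by
  have hshape : (es.foldl (fun b e => b.modify e.1 [] (fun t => t ++ [e.2.1])) PySem.Dict.empty)
      = (es.foldl (fun d x => d.modify ((fun (e : String × String × String) => e.1) x) []
          ((fun (_ : PySem.Dict String (List String)) (e : String × String × String) (t : List String) => t ++ [e.2.1]) d x)) PySem.Dict.empty) := rfl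
  have hnd : (es.foldl (fun b e => b.modify e.1 [] (fun t => t ++ [e.2.1])) PySem.Dict.empty).keys.Nodup := by
    rw [hshape]
    exact PySem.Dict.nodup_keys_foldl_modify_key es (fun e => e.1) [] _ PySem.Dict.empty PySem.Dict.nodup_keys_empty
  have hkeys : (es.foldl (fun b e => b.modify e.1 [] (fun t => t ++ [e.2.1])) PySem.Dict.empty).keys
      = PySem.Set.ofList (es.map (fun e => e.1)) := by
    rw [hshape, PySem.Dict.keys_foldl_modify_key es (fun e => e.1) [] _ PySem.Dict.empty]
    rw [PySem.Dict.keys_empty]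
    rfl
  have hgetD : ∀ s, (es.foldl (fun b e => b.modify e.1 [] (fun t => t ++ [e.2.1])) PySem.Dict.empty).getD s []
      = (es.filter (fun e => e.1 == s)).map (fun e => e.2.1) := by
    intro s
    have h3 := PySem.Dict.getD_foldl_modify_append (es.map (fun e => (e.1, e.2.1))) (PySem.Dict.empty) s
    rw [List.foldl_map] at h3
    have h4 : (es.foldl (fun b e => b.modify e.1 [] (fun t => t ++ [e.2.1])) PySem.Dict.empty).getD s []
        = (PySem.Dict.empty : PySem.Dict String (List String)).getD s []
          ++ (List.map (fun x => x.2) (List.filter (fun p => p.1 == s) (es.map (fun e => (e.1, e.2.1))))) := h3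
    rw [h4, PySem.Dict.getD_empty, List.filter_map, List.map_map]
    simp [Function.comp_def]
  rw [PySem.Dict.items_eq_map_keys _ hnd []]
  rw [hkeys]
  exact List.map_congr_left (fun s _ => by rw [hgetD s])

-- characterisation of A's second (resolving) pass
theorem pv_resolved_items (d : PySem.Dict String String) (L : List (String × List String))
    (hnd : (L.map (fun sp => sp.1)).Nodup) :
    (L.foldl (fun r sp =>
      if sp.2.length ≠ 1 then r
      else
        if (PySem.Dict.getD d (PySem.List.pyGetD sp.2 0 "") "") = "" then r
        else r.insert sp.1 (PySem.Dict.getD d (PySem.List.pyGetD sp.2 0 "") "")) PySem.Dict.empty).items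
    = (L.filter (fun sp => decide (sp.2.length = 1 ∧ PySem.Dict.getD d (PySem.List.pyGetD sp.2 0 "") "" ≠ ""))).map
        (fun sp => (sp.1, PySem.Dict.getD d (PySem.List.pyGetD sp.2 0 "") "")) := by
  have e1 : (L.foldl (fun r sp =>
      if sp.2.length ≠ 1 then r
      else
        if (PySem.Dict.getD d (PySem.List.pyGetD sp.2 0 "") "") = "" then r
        else r.insert sp.1 (PySem.Dict.getD d (PySem.List.pyGetD sp.2 0 "") "")) PySem.Dict.empty)
      = (L.foldl (fun r sp =>
        if sp.2.length = 1 ∧ PySem.Dict.getD d (PySem.List.pyGetD sp.2 0 "") "" ≠ ""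
        then r.insert sp.1 (PySem.Dict.getD d (PySem.List.pyGetD sp.2 0 "") "") else r) PySem.Dict.empty) := by
    refine PySem.List.foldl_congr_mem L _ _ _ ?_
    intro acc x _
    by_cases hl : x.2.length = 1
    · by_cases hv : PySem.Dict.getD d (PySem.List.pyGetD x.2 0 "") "" = "" <;> simp [hl, hv]
    · simp [hl]
  rw [e1]
  have e2 := PySem.List.foldl_ite_eq_foldl_filter
    (p := fun sp : String × List String => sp.2.length = 1 ∧ PySem.Dict.getD d (PySem.List.pyGetD sp.2 0 "") "" ≠ "")
    (f := fun r sp => r.insert sp.1 (PySem.Dict.getD d (PySem.List.pyGetD sp.2 0 "") ""))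
    L PySem.Dict.empty
  rw [e2]
  have hnd2 : ((L.filter (fun sp => decide (sp.2.length = 1 ∧ PySem.Dict.getD d (PySem.List.pyGetD sp.2 0 "") "" ≠ ""))).map (fun sp => sp.1)).Nodup :=
    (List.filter_sublist.map _).nodup hnd
  have h5 := PySem.Dict.items_foldl_insert_fresh
    (L.filter (fun sp => decide (sp.2.length = 1 ∧ PySem.Dict.getD d (PySem.List.pyGetD sp.2 0 "") "" ≠ "")))
    (fun sp => sp.1) (fun sp => PySem.Dict.getD d (PySem.List.pyGetD sp.2 0 "") "") PySem.Dict.empty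
    (fun a _ => PySem.Dict.contains_empty _) hnd2
  simpa using h5

-- characterisation of B's single pass
theorem pv_B_char (l : List (String × String × String)) :
    ((l.foldl pvGB (PySem.Dict.empty, PySem.Set.empty)).1.items
      = (l.filter (fun e => ((l.map (fun e => e.1)).count e.1 == 1))).map (fun e => (e.1, e.2.2)))
    ∧ ∀ s, PySem.Set.contains (l.foldl pvGB (PySem.Dict.empty, PySem.Set.empty)).2 s
        = decide (2 ≤ (l.map (fun e => e.1)).count s) := by
  induction l using List.reverseRecOn with
  | nil => exact ⟨rfl, fun s => rfl⟩
  | append_singleton l a ih =>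
    obtain ⟨ih1, ih2⟩ := ih
    have hfold : (l ++ [a]).foldl pvGB (PySem.Dict.empty, PySem.Set.empty)
        = pvGB (l.foldl pvGB (PySem.Dict.empty, PySem.Set.empty)) a := by
      rw [List.foldl_append]; rfl
    have hca : ((l ++ [a]).map (fun e => e.1)).count a.1 = (l.map (fun e => e.1)).count a.1 + 1 := by
      rw [List.map_append, List.count_append]
      simp
    have hcne : ∀ s, a.1 ≠ s → ((l ++ [a]).map (fun e => e.1)).count s = (l.map (fun e => e.1)).count s := by
      intro s hs
      rw [List.map_append, List.count_append]
      simp [hs]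
    have hmemcnt : ∀ x ∈ l, 0 < (l.map (fun e => e.1)).count x.1 := fun x hx =>
      List.count_pos_iff.mpr (List.mem_map.mpr ⟨x, hx, rfl⟩)
    have hmemS : ∀ s, s ∈ (l.foldl pvGB (PySem.Dict.empty, PySem.Set.empty)).2
        ↔ 2 ≤ (l.map (fun e => e.1)).count s := by
      intro s
      have h' : decide (s ∈ (l.foldl pvGB (PySem.Dict.empty, PySem.Set.empty)).2)
          = decide (2 ≤ (l.map (fun e => e.1)).count s) := by
        rw [← List.contains_eq_mem]
        exact ih2 s
      exact decide_eq_decide.mp h'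
    by_cases h2 : 2 ≤ (l.map (fun e => e.1)).count a.1
    · -- suffix already ambiguous: state unchanged
      have hS : PySem.Set.contains (l.foldl pvGB (PySem.Dict.empty, PySem.Set.empty)).2 a.1 = true := by
        rw [ih2 a.1]; exact decide_eq_true h2
      rw [hfold, pvGB_amb _ a hS]
      refine ⟨?_, ?_⟩
      · rw [ih1, List.filter_append]
        have hea : List.filter (fun e => ((l ++ [a]).map (fun e => e.1)).count e.1 == 1) [a] = [] := by
          have hfalse : (((l ++ [a]).map (fun e => e.1)).count a.1 == 1) = false := by
            rw [beq_eq_false_iff_ne, hca]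
            omega
          simp only [List.filter_cons, List.filter_nil]
          rw [hfalse]
          rfl
        rw [hea, List.append_nil]
        congr 1
        refine List.filter_congr ?_
        intro x _
        by_cases hax : a.1 = x.1
        · refine (pv_beq_one_congr _ _ ?_).symm
          rw [← hax, hca]
          omega
        · refine (pv_beq_one_congr _ _ ?_).symm
          rw [hcne x.1 hax]
      · intro s
        rw [ih2 s, decide_eq_decide]
        by_cases has : a.1 = s
        · rw [← has, hca]; omega
        · rw [hcne s has]
    · by_cases h1 : (l.map (fun e => e.1)).count a.1 = 1
      · -- second sighting: demote the candidate
        obtain ⟨x, hxf, hxl, hx1⟩ := pv_filter_key_singleton l a.1 h1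
        have hS : PySem.Set.contains (l.foldl pvGB (PySem.Dict.empty, PySem.Set.empty)).2 a.1 = false := by
          rw [ih2 a.1]; exact decide_eq_false (by omega)
        have hC : (l.foldl pvGB (PySem.Dict.empty, PySem.Set.empty)).1.contains a.1 = true := by
          show ((l.foldl pvGB (PySem.Dict.empty, PySem.Set.empty)).1.items.any (fun p => p.1 == a.1)) = true
          rw [ih1]
          refine List.any_eq_true.mpr ⟨(x.1, x.2.2), List.mem_map.mpr ⟨x, List.mem_filter.mpr ⟨hxl, ?_⟩, rfl⟩, by simp [hx1]⟩
          rw [hx1, h1]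
          rfl
        rw [hfold, pvGB_demote _ a hS hC]
        refine ⟨?_, ?_⟩
        · show ((l.foldl pvGB (PySem.Dict.empty, PySem.Set.empty)).1.items.filter (fun p => !(p.1 == a.1))) = _
          rw [ih1, List.filter_map, List.filter_filter, List.filter_append]
          have hea : List.filter (fun e => ((l ++ [a]).map (fun e => e.1)).count e.1 == 1) [a] = [] := by
            have hfalse : (((l ++ [a]).map (fun e => e.1)).count a.1 == 1) = false := by
              rw [beq_eq_false_iff_ne, hca]
              omega
            simp only [List.filter_cons, List.filter_nil]
            rw [hfalse]
            rfl
          rw [hea, List.append_nil]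
          congr 1
          refine (List.filter_congr ?_).symm
          intro y _
          simp only [Function.comp_def]
          by_cases hay : a.1 = y.1
          · have hb : (y.1 == a.1) = true := beq_iff_eq.mpr hay.symm
            have hcy : ((l ++ [a]).map (fun e => e.1)).count y.1 = 2 := by
              rw [← hay, hca, h1]
            rw [hcy, hb]
            rfl
          · have hb : (y.1 == a.1) = false := beq_eq_false_iff_ne.mpr (fun h => hay h.symm)
            rw [hb, hcne y.1 hay]
            simp
        · intro s
          show List.contains (PySem.Set.add (l.foldl pvGB (PySem.Dict.empty, PySem.Set.empty)).2 a.1) s = _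
          rw [List.contains_eq_mem, decide_eq_decide, PySem.Set.mem_add, hmemS s]
          by_cases has : a.1 = s
          · rw [← has, hca, h1]
            simp
          · rw [hcne s has]
            simp [show ¬ s = a.1 from fun h => has h.symm]
      · -- first sighting: new sole candidate
        have h0 : (l.map (fun e => e.1)).count a.1 = 0 := by omega
        have hS : PySem.Set.contains (l.foldl pvGB (PySem.Dict.empty, PySem.Set.empty)).2 a.1 = false := by
          rw [ih2 a.1]; exact decide_eq_false (by omega)
        have hnotl : ∀ x ∈ l, x.1 ≠ a.1 := by
          intro x hx hxa
          have := hmemcnt x hx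
          rw [hxa] at this
          omega
        have hC : (l.foldl pvGB (PySem.Dict.empty, PySem.Set.empty)).1.contains a.1 = false := by
          show ((l.foldl pvGB (PySem.Dict.empty, PySem.Set.empty)).1.items.any (fun p => p.1 == a.1)) = false
          rw [ih1]
          cases hb : ((l.filter (fun e => ((l.map (fun e => e.1)).count e.1 == 1))).map (fun e => (e.1, e.2.2))).any (fun p => p.1 == a.1) with
          | false => rfl
          | true =>
            exfalso
            obtain ⟨q, hq, hq1⟩ := List.any_eq_true.mp hb
            obtain ⟨y, hy, hyq⟩ := List.mem_map.mp hq
            have hy1 : y.1 = a.1 := by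
              rw [← hyq] at hq1
              simpa using hq1
            exact (hnotl y (List.mem_filter.mp hy).1) hy1
        rw [hfold, pvGB_new _ a hS hC]
        refine ⟨?_, ?_⟩
        · show ((l.foldl pvGB (PySem.Dict.empty, PySem.Set.empty)).1.insert a.1 a.2.2).items = _
          rw [PySem.Dict.items_insert_of_not_contains _ _ hC, ih1, List.filter_append]
          have hea : List.filter (fun e => ((l ++ [a]).map (fun e => e.1)).count e.1 == 1) [a] = [a] := by
            have htrue : (((l ++ [a]).map (fun e => e.1)).count a.1 == 1) = true := by
              rw [beq_iff_eq, hca]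
              omega
            simp only [List.filter_cons, List.filter_nil]
            rw [htrue]
            rfl
          rw [hea]
          have h7 : List.filter (fun e => ((l ++ [a]).map (fun e => e.1)).count e.1 == 1) l
              = List.filter (fun e => ((l.map (fun e => e.1)).count e.1 == 1)) l := by
            refine List.filter_congr ?_
            intro y hy
            refine pv_beq_one_congr _ _ ?_
            rw [hcne y.1 (fun h => (hnotl y hy) h.symm)]
          rw [h7, List.map_append]
          rfl
        · intro s
          rw [ih2 s, decide_eq_decide]
          by_cases has : a.1 = s
          · rw [← has, hca, h0]
            omega
          · rw [hcne s has]

-- every passing entry's vendor is non-empty and is what the dict lookup by its prefix returns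
theorem pv_es_vendor (db : List (String × String)) (x : String × String × String)
    (hx : x ∈ (PySem.Dict.ofList db).items.filterMap pvPass) :
    x.2.2 ≠ "" ∧ PySem.Dict.getD (PySem.Dict.ofList db) x.2.1 "" = x.2.2 := by
  obtain ⟨pv, hpv, hps⟩ := List.mem_filterMap.mp hx
  obtain ⟨he1, he2, hne⟩ := pvPass_some hps
  refine ⟨by rw [he2]; exact hne, ?_⟩
  rw [he1, he2]
  exact PySem.Dict.getD_of_mem_items _ hpv (PySem.Dict.nodup_keys_ofList db) ""

-- A's two passes over the passing entries compute B's single-pass result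
theorem pv_AB (d : PySem.Dict String String) (es : List (String × String × String))
    (hvend : ∀ x ∈ es, x.2.2 ≠ "" ∧ PySem.Dict.getD d x.2.1 "" = x.2.2) :
    ((es.foldl (fun b e => b.modify e.1 [] (fun t => t ++ [e.2.1])) PySem.Dict.empty).items.foldl
      (fun r sp =>
        if sp.2.length ≠ 1 then r
        else
          if (PySem.Dict.getD d (PySem.List.pyGetD sp.2 0 "") "") = "" then r
          else r.insert sp.1 (PySem.Dict.getD d (PySem.List.pyGetD sp.2 0 "") ""))
      PySem.Dict.empty).items
    = (es.filter (fun e => ((es.map (fun e => e.1)).count e.1 == 1))).map (fun e => (e.1, e.2.2)) := by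
  rw [pv_buckets_items es]
  have hndL : (((PySem.Set.ofList (es.map (fun e => e.1))).map
      (fun s => (s, (es.filter (fun e => e.1 == s)).map (fun e => e.2.1)))).map (fun sp => sp.1)).Nodup := by
    rw [List.map_map, show ((fun (sp : String × List String) => sp.1) ∘ (fun s => (s, (es.filter (fun e => e.1 == s)).map (fun e => e.2.1)))) = (fun s : String => s) from rfl]
    rw [show (List.map (fun s : String => s) (PySem.Set.ofList (es.map (fun e => e.1)))) = PySem.Set.ofList (es.map (fun e => e.1)) from List.map_id' _]
    exact PySem.Set.nodup_ofList _
  rw [pv_resolved_items d _ hndL]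
  rw [List.filter_map (f := fun s => (s, (es.filter (fun e => e.1 == s)).map (fun e => e.2.1)))
    (p := fun sp => decide (sp.2.length = 1 ∧ PySem.Dict.getD d (PySem.List.pyGetD sp.2 0 "") "" ≠ ""))
    (l := PySem.Set.ofList (es.map (fun e => e.1)))]
  rw [List.map_map]
  have hcount : ∀ s, ((es.map (fun e => e.1)).count s) = ((es.filter (fun e => e.1 == s)).map (fun e => e.2.1)).length := by
    intro s
    rw [List.length_map, ← List.countP_eq_length_filter, List.count_eq_countP, List.countP_map]
    rfl
  have hkey : ∀ s, ((es.map (fun e => e.1)).count s) = 1 →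
      ∃ x, es.filter (fun e => e.1 == s) = [x] ∧ x ∈ es ∧ x.1 = s ∧
        PySem.Dict.getD d (PySem.List.pyGetD ((es.filter (fun e => e.1 == s)).map (fun e => e.2.1)) 0 "") "" = x.2.2 := by
    intro s hs
    obtain ⟨x, hxf, hxl, hx1⟩ := pv_filter_key_singleton es s hs
    refine ⟨x, hxf, hxl, hx1, ?_⟩
    rw [hxf]
    show PySem.Dict.getD d x.2.1 "" = x.2.2
    exact (hvend x hxl).2
  have hfc : List.filter ((fun sp : String × List String => decide (sp.2.length = 1 ∧ PySem.Dict.getD d (PySem.List.pyGetD sp.2 0 "") "" ≠ "")) ∘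
        (fun s => (s, (es.filter (fun e => e.1 == s)).map (fun e => e.2.1))))
        (PySem.Set.ofList (es.map (fun e => e.1)))
      = List.filter (fun s => (es.map (fun e => e.1)).count s == 1) (PySem.Set.ofList (es.map (fun e => e.1))) := by
    refine List.filter_congr ?_
    intro s _
    simp only [Function.comp_def]
    rw [Bool.eq_iff_iff]
    simp only [decide_eq_true_eq, beq_iff_eq]
    constructor
    · intro hl
      rw [hcount s]
      exact hl.1
    · intro hc
      obtain ⟨x, hxf, hxl, hx1, hxv⟩ := hkey s hc
      refine ⟨by rw [← hcount s]; exact hc, ?_⟩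
      rw [hxv]
      exact (hvend x hxl).1
  rw [hfc]
  rw [pv_ofList_filter_unique (es.map (fun e => e.1)) (fun s => (es.map (fun e => e.1)).count s == 1) (by
    intro s hs
    have : (es.map (fun e => e.1)).count s = 1 := by simpa using hs
    omega)]
  have hfilt : List.filter (fun s => (es.map (fun e => e.1)).count s == 1) (es.map (fun e => e.1))
      = (es.filter (fun e => ((es.map (fun e => e.1)).count e.1 == 1))).map (fun e => e.1) := by
    rw [List.filter_map]
    rfl
  rw [hfilt, List.map_map]
  refine List.map_congr_left ?_
  intro x hx
  obtain ⟨hxl, hxp⟩ := List.mem_filter.mp hx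
  have hc : (es.map (fun e => e.1)).count x.1 = 1 := by simpa using hxp
  obtain ⟨y, hyf, _, _, hyv⟩ := hkey x.1 hc
  have hxy : x = y := by
    have hxmem : x ∈ es.filter (fun e => e.1 == x.1) := List.mem_filter.mpr ⟨hxl, by simp⟩
    rw [hyf] at hxmem
    simpa using hxmem
  simp only [Function.comp_def]
  rw [hyv, ← hxy]

theorem pv_main (db : List (String × String)) :
    build_unique_oui_suffix_vendor_index_py db = build_unique_oui_suffix_vendor_index_py_alt db := by
  have hB : build_unique_oui_suffix_vendor_index_py_alt db
      = (((PySem.Dict.ofList db).items.filterMap pvPass).foldl pvGB (PySem.Dict.empty, PySem.Set.empty)).1.items := by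
    show (((PySem.Dict.ofList db).items.foldl _ (PySem.Dict.empty, PySem.Set.empty)).1.items) = _
    rw [pv_foldB_eq]
  have hA : build_unique_oui_suffix_vendor_index_py db
      = ((((PySem.Dict.ofList db).items.filterMap pvPass).foldl
          (fun b e => b.modify e.1 [] (fun t => t ++ [e.2.1])) PySem.Dict.empty).items.foldl
        (fun r sp =>
          if sp.2.length ≠ 1 then r
          else
            if (PySem.Dict.getD (PySem.Dict.ofList db) (PySem.List.pyGetD sp.2 0 "") "") = "" then r
            else r.insert sp.1 (PySem.Dict.getD (PySem.Dict.ofList db) (PySem.List.pyGetD sp.2 0 "") ""))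
        PySem.Dict.empty).items := by
    show ((((PySem.Dict.ofList db).items.foldl _ PySem.Dict.empty : PySem.Dict String (List String)).items.foldl _ PySem.Dict.empty : PySem.Dict String String)).items = _
    rw [pv_foldA_eq]
  rw [hA, hB, (pv_B_char _).1]
  exact pv_AB (PySem.Dict.ofList db) _ (fun x hx => pv_es_vendor db x hx)

-- ===== VERDICT (by name: the statement is the Claim_ definition above) =====
theorem build_unique_oui_suffix_vendor_index_py_spec : Claim_equal_build_unique_oui_suffix_vendor_index_py := by
  intro oui_db _
  unfold Spec_build_unique_oui_suffix_vendor_index_py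
  exact pv_main oui_db
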